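-- pv_equiv track=rewrite | github.com/Mamdouh66/Python-Course | lab5/task4.py | summer_of_69
-- ===== SOURCE A (Python) =====
-- def summer_of_69(lst: list):
--     total, flag = 0, False
--     for i in lst:
--         if not flag:
--             if i == 6:
--                 flag = True
--             else:
--                 total += i
--         elif i == 9:
--             flag = False
--     return total
-- ===== SOURCE B (Python) =====
-- def summer_of_69(lst: list):
--     if 6 not in lst:
--         return sum(lst)
--     i = lst.index(6)
--     pre = sum(lst[:i])
--     rest = lst[i + 1:]
--     if 9 not in rest:
--         return pre
--     j = rest.index(9)
--     return pre + summer_of_69(rest[j + 1:])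
-- ===== Notes on version B (the rewrite author's own statement) =====
-- stated objective: alternative
-- what changed: Replaces the single-pass skip-flag loop with find-and-slice recursion: locate the first 6, sum the prefix before it, find the first 9 after it and recurse on the suffix past that 9.
import Mathlib
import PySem

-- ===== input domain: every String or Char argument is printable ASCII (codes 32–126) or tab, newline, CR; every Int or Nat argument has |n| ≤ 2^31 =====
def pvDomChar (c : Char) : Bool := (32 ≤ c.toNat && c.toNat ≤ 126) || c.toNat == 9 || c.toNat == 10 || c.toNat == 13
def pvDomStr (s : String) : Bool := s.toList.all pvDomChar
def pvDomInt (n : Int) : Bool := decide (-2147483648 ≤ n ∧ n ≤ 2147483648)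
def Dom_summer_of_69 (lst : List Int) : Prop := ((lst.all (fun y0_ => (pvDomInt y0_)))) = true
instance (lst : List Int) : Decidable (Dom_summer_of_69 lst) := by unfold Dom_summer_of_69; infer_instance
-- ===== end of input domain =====

-- B replaces A's single-pass skip-flag loop by find-and-slice recursion (locate 6, sum the prefix, resume after the first following 9); alternative decomposition, same cost.


-- ===== PORT A =====
-- loop body of A, on the state (total, flag)
def sum69Step (s : Int × Bool) (i : Int) : Int × Bool :=
  if !s.2 then
    if i = 6 then (s.1, true) else (s.1 + i, s.2)
  else if i = 9 then (s.1, false) else s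

def summer_of_69 (lst : List Int) : Int :=
  (lst.foldl sum69Step (0, false)).1

-- ===== PORT B =====
def summer_of_69_alt (lst : List Int) : Int :=
  match h6 : PySem.List.index? lst 6 with
  | none => lst.sum
  | some i =>
    let pre := (PySem.List.slice lst none (some (i : Int))).sum
    let rest := PySem.List.slice lst (some ((i : Int) + 1)) none
    match PySem.List.index? rest 9 with
    | none => pre
    | some j => pre + summer_of_69_alt (PySem.List.slice rest (some ((j : Int) + 1)) none)
termination_by lst.length
decreasing_by
  have hi : ((i : Int) + 1) = ((i + 1 : Nat) : Int) := by push_cast; ring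
  have hj : ((j : Int) + 1) = ((j + 1 : Nat) : Int) := by push_cast; ring
  obtain ⟨p, s, hs, -, -⟩ := (PySem.List.index?_eq_some_iff _ _ _).mp h6
  subst hs
  simp only [hi, hj, PySem.List.slice_from_natCast, List.length_drop,
    List.length_append, List.length_cons]
  omega

-- ===== PRECONDITION & SPEC =====
def Spec_summer_of_69 (lst : List Int) (out : Int) : Prop := out = summer_of_69_alt lst
instance (lst : List Int) (out : Int) : Decidable (Spec_summer_of_69 lst out) := by unfold Spec_summer_of_69; infer_instance

-- ===== CLAIM (what is proved, stated in full; the proofs are below) =====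
def Claim_equal_summer_of_69 : Prop := ∀ (lst : List Int), Dom_summer_of_69 lst → Spec_summer_of_69 lst (summer_of_69 lst)

-- ===== LEMMAS AND PROOFS =====

-- A's loop with the flag down, over a 6-free list, just adds the list's sum.
theorem sum69_fold_no6 : ∀ (xs : List Int), (6 : Int) ∉ xs → ∀ (t : Int),
    xs.foldl sum69Step (t, false) = (t + xs.sum, false)
  | [], _, t => by simp
  | x :: xs, h, t => by
    have hx : x ≠ 6 := fun hx => h (by simp [hx])
    have ih := sum69_fold_no6 xs (fun hm => h (List.mem_cons_of_mem _ hm)) (t + x)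
    simp only [List.foldl_cons, sum69Step, hx, if_false, Bool.not_false, if_true, List.sum_cons]
    rw [ih]; ring_nf

-- A's loop with the flag up, over a 9-free list, does nothing.
theorem sum69_fold_no9 : ∀ (xs : List Int), (9 : Int) ∉ xs → ∀ (t : Int),
    xs.foldl sum69Step (t, true) = (t, true)
  | [], _, _ => by simp
  | x :: xs, h, t => by
    have hx : x ≠ 9 := fun hx => h (by simp [hx])
    have ih := sum69_fold_no9 xs (fun hm => h (List.mem_cons_of_mem _ hm)) t
    simp only [List.foldl_cons, sum69Step, hx, if_false, Bool.not_true]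
    exact ih

-- Main invariant: A's fold from (t, false) computes t + B's value.
theorem sum69_main : ∀ (n : Nat) (lst : List Int) (t : Int), lst.length ≤ n →
    (lst.foldl sum69Step (t, false)).1 = t + summer_of_69_alt lst := by
  intro n
  induction n with
  | zero =>
    intro lst t hlen
    have : lst = [] := List.eq_nil_of_length_eq_zero (Nat.le_zero.mp hlen)
    subst this
    simp [summer_of_69_alt]
  | succ n ih =>
    intro lst t hlen
    rw [summer_of_69_alt]
    cases h6 : PySem.List.index? lst 6 with
    | none =>
      have hnot : (6 : Int) ∉ lst := (PySem.List.index?_eq_none_iff _ _).mp h6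
      simp [sum69_fold_no6 lst hnot t]
    | some i =>
      obtain ⟨pre, suf, hsplit, hlen_pre, hnotpre⟩ := (PySem.List.index?_eq_some_iff _ _ _).mp h6
      subst hsplit
      have hcast : ((i : Int) + 1) = ((i + 1 : Nat) : Int) := by push_cast; ring
      have htake : PySem.List.slice (pre ++ 6 :: suf) none (some (i : Int)) = pre := by
        rw [PySem.List.slice_to_natCast, ← hlen_pre, List.take_left]
      have hdrop : PySem.List.slice (pre ++ 6 :: suf) (some ((i : Int) + 1)) none = suf := by
        rw [hcast, PySem.List.slice_from_natCast, ← hlen_pre,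
          show pre ++ (6 : Int) :: suf = (pre ++ [6]) ++ suf by simp,
          show pre.length + 1 = (pre ++ [(6 : Int)]).length by simp, List.drop_left]
      rw [List.foldl_append, sum69_fold_no6 pre hnotpre t]
      simp only [List.foldl_cons, sum69Step, Bool.not_false, if_true]
      rw [htake, hdrop]
      cases h9 : PySem.List.index? suf 9 with
      | none =>
        have hnot9 : (9 : Int) ∉ suf := (PySem.List.index?_eq_none_iff _ _).mp h9
        simp [sum69_fold_no9 suf hnot9 _]
      | some j =>
        obtain ⟨mid, tail, hsplit9, hlen_mid, hnotmid⟩ := (PySem.List.index?_eq_some_iff _ _ _).mp h9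
        subst hsplit9
        have hcastj : ((j : Int) + 1) = ((j + 1 : Nat) : Int) := by push_cast; ring
        have hdropj : PySem.List.slice (mid ++ 9 :: tail) (some ((j : Int) + 1)) none = tail := by
          rw [hcastj, PySem.List.slice_from_natCast, ← hlen_mid,
            show mid ++ (9 : Int) :: tail = (mid ++ [9]) ++ tail by simp,
            show mid.length + 1 = (mid ++ [(9 : Int)]).length by simp, List.drop_left]
        have htail : tail.length ≤ n := by
          have := hlen
          simp only [List.length_append, List.length_cons] at this
          omega
        have hstep : sum69Step (t + pre.sum, true) 9 = (t + pre.sum, false) := by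
          simp [sum69Step]
        rw [List.foldl_append, sum69_fold_no9 mid hnotmid _, List.foldl_cons, hstep,
          ih tail _ htail]
        dsimp only
        rw [hdropj]
        ring

-- ===== VERDICT (by name: the statement is the Claim_ definition above) =====
theorem summer_of_69_spec : Claim_equal_summer_of_69 := by
  intro lst _
  unfold Spec_summer_of_69 summer_of_69
  have := sum69_main lst.length lst 0 le_rfl
  omega
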